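-- pv_equiv track=rewrite | github.com/luistiagos/retrosystemlemuroid | generate_catalog_manifest_cover2d.py | build_cover_map
-- ===== SOURCE A (Python) =====
-- from typing import Dict, Iterable, List
--
-- def resolve_cover2d(entry: Dict) -> str:
--     return (
--         entry.get("cover2d_url")
--         or entry.get("cover2d")
--         or entry.get("image_url")
--         or entry.get("thumbnail_url")
--         or ""
--     )
--
-- def build_cover_map(entries: Iterable[Dict]) -> Dict[str, str]:
--     cover_map: Dict[str, str] = {}
--     for entry in entries:
--         manifest_path = (entry.get("manifest_path") or "").strip()
--         if not manifest_path:
--             continue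
--         cover = resolve_cover2d(entry).strip()
--         # Keep first non-empty cover seen for the same manifest path.
--         if manifest_path not in cover_map or (not cover_map[manifest_path] and cover):
--             cover_map[manifest_path] = cover
--     return cover_map
-- ===== SOURCE B (Python) =====
-- from typing import Dict, Iterable, List
--
-- def resolve_cover2d(entry: Dict) -> str:
--     for key in ("cover2d_url", "cover2d", "image_url", "thumbnail_url"):
--         value = entry.get(key)
--         if value:
--             return value
--     return ""
--
-- def build_cover_map(entries: Iterable[Dict]) -> Dict[str, str]:
--     entries = list(entries)
--     # Stage 1: manifest paths in first-appearance order (empty ones skipped).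
--     paths: List[str] = []
--     for entry in entries:
--         path = (entry.get("manifest_path") or "").strip()
--         if path and path not in paths:
--             paths.append(path)
--
--     # Stage 2: each path gets the first non-empty stripped cover among its entries, or "".
--     def first_cover(path: str) -> str:
--         for entry in entries:
--             if (entry.get("manifest_path") or "").strip() == path:
--                 cover = resolve_cover2d(entry).strip()
--                 if cover:
--                     return cover
--         return ""
--
--     return {path: first_cover(path) for path in paths}
-- ===== Notes on version B (the rewrite author's own statement) =====
-- stated objective: alternative
-- what changed: Replaces A's single pass with conditional in-place dict overwrites by two staged passes: first collect the distinct non-empty manifest paths in first-appearance order, then for each path linearly scan the entries for its first non-empty stripped cover (default empty string); the resolver becomes a loop over the four candidate keys instead of a chain of or-expressions.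
import Mathlib
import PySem

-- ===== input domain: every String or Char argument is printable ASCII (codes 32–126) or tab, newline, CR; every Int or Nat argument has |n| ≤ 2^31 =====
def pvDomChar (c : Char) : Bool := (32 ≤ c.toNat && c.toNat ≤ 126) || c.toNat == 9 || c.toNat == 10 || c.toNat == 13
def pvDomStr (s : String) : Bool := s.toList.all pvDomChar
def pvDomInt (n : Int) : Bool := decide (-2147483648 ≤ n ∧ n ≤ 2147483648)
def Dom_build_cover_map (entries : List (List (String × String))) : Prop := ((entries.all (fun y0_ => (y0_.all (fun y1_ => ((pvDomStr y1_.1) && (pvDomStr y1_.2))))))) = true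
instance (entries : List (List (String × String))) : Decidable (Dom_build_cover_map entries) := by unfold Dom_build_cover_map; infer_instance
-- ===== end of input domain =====

-- B rebuilds the same map in two staged passes (collect the distinct manifest paths in
-- first-appearance order, then scan the entries per path for its first non-empty cover);
-- equal result, no speed claim.

-- ===== PORT A =====
-- entry.get(k): the assoc list stands for a Python dict, so look it up through PySem.Dict
def pvGet (entry : List (String × String)) (k : String) : Option String :=
  (PySem.Dict.ofList entry).get? k

-- Python 'x or y' on these strings: None (mapped to "") and "" both fall through
def pvOr (a b : String) : String := if a = "" then b else a

def resolve_cover2d (entry : List (String × String)) : String :=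
  pvOr ((pvGet entry "cover2d_url").getD "")
    (pvOr ((pvGet entry "cover2d").getD "")
      (pvOr ((pvGet entry "image_url").getD "")
        (pvOr ((pvGet entry "thumbnail_url").getD "") "")))

def build_cover_map (entries : List (List (String × String))) : List (String × String) :=
  (entries.foldl (fun cover_map entry =>
      let manifest_path := PySem.Str.strip ((pvGet entry "manifest_path").getD "")
      if manifest_path = "" then cover_map
      else
        let cover := PySem.Str.strip (resolve_cover2d entry)
        if cover_map.contains manifest_path = false ∨
            (cover_map.getD manifest_path "" = "" ∧ cover ≠ "") then
          cover_map.insert manifest_path cover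
        else cover_map)
    PySem.Dict.empty).items

-- ===== PORT B =====
-- Source B's resolver: loop over the four keys, return the first truthy value
def resolve_cover2d_alt (entry : List (String × String)) : String :=
  (["cover2d_url", "cover2d", "image_url", "thumbnail_url"].findSome? (fun key =>
      match (PySem.Dict.ofList entry).get? key with
      | some value => if value = "" then none else some value
      | none => none)).getD ""

-- Source B's inner first_cover: scan the entries for the first matching one with a non-empty cover
def first_cover (entries : List (List (String × String))) (path : String) : String :=
  (entries.findSome? (fun entry =>
      if PySem.Str.strip (((PySem.Dict.ofList entry).get? "manifest_path").getD "") = path then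
        let cover := PySem.Str.strip (resolve_cover2d_alt entry)
        if cover = "" then none else some cover
      else none)).getD ""

def build_cover_map_alt (entries : List (List (String × String))) : List (String × String) :=
  -- stage 1: the distinct non-empty manifest paths in first-appearance order
  let paths := entries.foldl (fun ps entry =>
      let path := PySem.Str.strip (((PySem.Dict.ofList entry).get? "manifest_path").getD "")
      if path = "" ∨ ps.contains path then ps else ps ++ [path]) []
  -- stage 2: the dict comprehension {path: first_cover(path) for path in paths}
  (paths.foldl (fun d path => d.insert path (first_cover entries path)) PySem.Dict.empty).items

-- ===== PRECONDITION & SPEC =====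
def Spec_build_cover_map (entries : List (List (String × String))) (out : List (String × String)) : Prop := out = build_cover_map_alt entries
instance (entries : List (List (String × String))) (out : List (String × String)) : Decidable (Spec_build_cover_map entries out) := by unfold Spec_build_cover_map; infer_instance

-- ===== CLAIM (what is proved, stated in full; the proofs are below) =====
def Claim_equal_build_cover_map : Prop := ∀ (entries : List (List (String × String))), Dom_build_cover_map entries → Spec_build_cover_map entries (build_cover_map entries)

-- ===== LEMMAS AND PROOFS =====

-- the stripped manifest path of an entry (shared expression of both ports)
def manifestOf (entry : List (String × String)) : String :=
  PySem.Str.strip (((PySem.Dict.ofList entry).get? "manifest_path").getD "")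

-- the stripped cover, through each side's resolver
def coverOfA (entry : List (String × String)) : String :=
  PySem.Str.strip (resolve_cover2d entry)
def coverOf (entry : List (String × String)) : String :=
  PySem.Str.strip (resolve_cover2d_alt entry)

lemma resolve_eq (entry : List (String × String)) :
    resolve_cover2d entry = resolve_cover2d_alt entry := by
  unfold resolve_cover2d resolve_cover2d_alt pvOr pvGet
  cases h1 : (PySem.Dict.ofList entry).get? "cover2d_url" <;>
    cases h2 : (PySem.Dict.ofList entry).get? "cover2d" <;>
      cases h3 : (PySem.Dict.ofList entry).get? "image_url" <;>
        cases h4 : (PySem.Dict.ofList entry).get? "thumbnail_url" <;>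
          simp [List.findSome?, h1, h2, h3, h4] <;> split_ifs <;> simp_all

lemma cover_eq (entry : List (String × String)) : coverOfA entry = coverOf entry := by
  simp [coverOfA, coverOf, resolve_eq]

-- A's loop body, named
def stepA (d : PySem.Dict String String) (entry : List (String × String)) :
    PySem.Dict String String :=
  if manifestOf entry = "" then d
  else if d.contains (manifestOf entry) = false ∨
      (d.getD (manifestOf entry) "" = "" ∧ coverOfA entry ≠ "") then
    d.insert (manifestOf entry) (coverOfA entry)
  else d

lemma buildA_eq (entries : List (List (String × String))) :
    build_cover_map entries = (entries.foldl stepA PySem.Dict.empty).items := rfl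

lemma stepA_eq (d : PySem.Dict String String) (e : List (String × String)) :
    stepA d e =
      if manifestOf e = "" then d
      else if d.contains (manifestOf e) = false ∨
          (d.getD (manifestOf e) "" = "" ∧ coverOf e ≠ "") then
        d.insert (manifestOf e) (coverOf e)
      else d := by
  unfold stepA; rw [cover_eq]

-- B's stage 1, named
def pathsOf (l : List (List (String × String))) : List String :=
  l.foldl (fun ps entry =>
    if manifestOf entry = "" ∨ ps.contains (manifestOf entry) then ps
    else ps ++ [manifestOf entry]) []

-- the candidate one entry of B's stage-2 scan contributes for a path
def probe (p : String) (entry : List (String × String)) : Option String :=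
  if manifestOf entry = p then (if coverOf entry = "" then none else some (coverOf entry))
  else none

def fcAux (l : List (List (String × String))) (p : String) : Option String :=
  l.findSome? (probe p)

lemma fc_eq (l : List (List (String × String))) (p : String) :
    first_cover l p = (fcAux l p).getD "" := rfl

lemma pathsOf_append (l : List (List (String × String))) (e : List (String × String)) :
    pathsOf (l ++ [e]) =
      if manifestOf e = "" ∨ (pathsOf l).contains (manifestOf e) then pathsOf l
      else pathsOf l ++ [manifestOf e] := by
  simp [pathsOf, List.foldl_append]

lemma fcAux_append (l : List (List (String × String))) (e : List (String × String)) (p : String) :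
    fcAux (l ++ [e]) p = (fcAux l p).or (probe p e) := by
  simp [fcAux, List.findSome?_append]

lemma pathsOf_props (l : List (List (String × String))) :
    (pathsOf l).Nodup ∧ ∀ x ∈ pathsOf l, x ≠ "" := by
  induction l using List.reverseRecOn with
  | nil => simp [pathsOf]
  | append_singleton l e ih =>
    rw [pathsOf_append]
    split_ifs with h
    · exact ih
    · rw [not_or] at h
      refine ⟨List.Nodup.append ih.1 (by simp) ?_, ?_⟩
      · intro a ha hb
        simp at hb; subst hb
        exact absurd (by simpa using ha) (by simpa using h.2)
      · intro x hx
        rcases List.mem_append.mp hx with hx | hx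
        · exact ih.2 x hx
        · simp at hx; subst hx; exact h.1

lemma mem_pathsOf (l : List (List (String × String))) (e : List (String × String))
    (he : e ∈ l) (h : manifestOf e ≠ "") : manifestOf e ∈ pathsOf l := by
  induction l using List.reverseRecOn with
  | nil => simp at he
  | append_singleton l e' ih =>
    rw [pathsOf_append]
    rcases List.mem_append.mp he with he | he
    · have := ih he
      split_ifs with hc
      · exact this
      · exact List.mem_append_left _ this
    · simp at he; subst he
      split_ifs with hc
      · rcases hc with hc | hc
        · exact absurd hc h
        · simpa using hc
      · simp

lemma probe_some {p x : String} {e : List (String × String)} (h : probe p e = some x) :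
    manifestOf e = p ∧ coverOf e = x ∧ x ≠ "" := by
  unfold probe at h
  split_ifs at h with h1 h2
  have h' := Option.some.inj h
  exact ⟨h1, h', fun he => h2 (h'.trans he)⟩

lemma fcAux_none_of_not_mem (l : List (List (String × String))) (p : String)
    (hp : p ≠ "") (h : p ∉ pathsOf l) : fcAux l p = none := by
  cases hf : fcAux l p with
  | none => rfl
  | some x =>
    obtain ⟨a, ha, hpa⟩ := List.exists_of_findSome?_eq_some hf
    obtain ⟨h1, -, -⟩ := probe_some hpa
    have hne : manifestOf a ≠ "" := by rw [h1]; exact hp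
    exact absurd (h1 ▸ mem_pathsOf l a ha hne) h

-- the invariant: A's fold over a prefix renders B's two stages over that prefix
lemma invA (l : List (List (String × String))) :
    (l.foldl stepA PySem.Dict.empty).items =
      (pathsOf l).map (fun p => (p, (fcAux l p).getD "")) := by
  induction l using List.reverseRecOn with
  | nil => rfl
  | append_singleton l e ih =>
    have hkeys : (l.foldl stepA PySem.Dict.empty).keys = pathsOf l := by
      simp [PySem.Dict.keys, ih, List.map_map, Function.comp_def]
    have hnd : (l.foldl stepA PySem.Dict.empty).keys.Nodup := by
      rw [hkeys]; exact (pathsOf_props l).1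
    have hcont : ∀ q : String, (l.foldl stepA PySem.Dict.empty).contains q
        = decide (q ∈ pathsOf l) := by
      intro q; rw [PySem.Dict.contains_eq_decide_mem_keys, hkeys]
    have hgetD : ∀ q ∈ pathsOf l,
        (l.foldl stepA PySem.Dict.empty).getD q "" = (fcAux l q).getD "" := by
      intro q hq
      exact PySem.Dict.getD_of_mem_items _ (by rw [ih]; exact List.mem_map_of_mem hq) hnd ""
    rw [List.foldl_append, List.foldl_cons, List.foldl_nil, stepA_eq]
    by_cases hp : manifestOf e = ""
    · rw [if_pos hp, ih, pathsOf_append, if_pos (Or.inl hp)]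
      apply List.map_congr_left
      intro q hq
      have hq0 : q ≠ "" := (pathsOf_props l).2 q hq
      have : probe q e = none := by unfold probe; rw [if_neg (by rw [hp]; exact fun h => hq0 h.symm)]
      rw [fcAux_append, this, Option.or_none]
    · rw [if_neg hp]
      by_cases hc : manifestOf e ∈ pathsOf l
      · -- existing key
        have hcont' : (l.foldl stepA PySem.Dict.empty).contains (manifestOf e) = true := by
          rw [hcont]; exact decide_eq_true hc
        have hpath : pathsOf (l ++ [e]) = pathsOf l := by
          rw [pathsOf_append, if_pos (Or.inr (by simpa using hc))]
        cases hf : fcAux l (manifestOf e) with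
        | some x =>
          -- a non-empty cover was already found: A does not overwrite
          obtain ⟨a, ha, hpa⟩ := List.exists_of_findSome?_eq_some hf
          have hx : x ≠ "" := (probe_some hpa).2.2
          have hgd : (l.foldl stepA PySem.Dict.empty).getD (manifestOf e) "" = x := by
            rw [hgetD _ hc, hf]; rfl
          rw [if_neg (by rw [hcont', hgd]; simp [hx])]
          rw [ih, hpath]
          apply List.map_congr_left
          intro q hq
          rw [fcAux_append]
          by_cases hqe : q = manifestOf e
          · subst hqe; rw [hf]; rfl
          · have : probe q e = none := by unfold probe; rw [if_neg (fun h => hqe h.symm)]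
            rw [this, Option.or_none]
        | none =>
          have hgd : (l.foldl stepA PySem.Dict.empty).getD (manifestOf e) "" = "" := by
            rw [hgetD _ hc, hf]; rfl
          by_cases hcv : coverOf e = ""
          · -- new cover empty too: A does not overwrite, value stays ""
            rw [if_neg (by rw [hcont', hgd]; simp [hcv])]
            rw [ih, hpath]
            apply List.map_congr_left
            intro q hq
            rw [fcAux_append]
            by_cases hqe : q = manifestOf e
            · subst hqe
              rw [hf, Option.none_or]
              simp [probe, hcv]
            · have : probe q e = none := by unfold probe; rw [if_neg (fun h => hqe h.symm)]
              rw [this, Option.or_none]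
          · -- stored cover empty, new one non-empty: A overwrites in place
            rw [if_pos (Or.inr ⟨hgd, hcv⟩)]
            rw [PySem.Dict.items_insert_of_contains _ _ hcont', ih, hpath, List.map_map]
            apply List.map_congr_left
            intro q hq
            simp only [Function.comp_def]
            rw [fcAux_append]
            by_cases hqe : q = manifestOf e
            · subst hqe
              rw [hf, Option.none_or]
              have hpe : probe (manifestOf e) e = some (coverOf e) := by
                unfold probe; rw [if_pos rfl, if_neg hcv]
              rw [hpe]; simp
            · have : probe q e = none := by unfold probe; rw [if_neg (fun h => hqe h.symm)]
              rw [this, Option.or_none]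
              simp [beq_iff_eq, hqe]
      · -- fresh key: A appends
        have hcont' : (l.foldl stepA PySem.Dict.empty).contains (manifestOf e) = false := by
          rw [hcont]; exact decide_eq_false hc
        rw [if_pos (Or.inl hcont')]
        rw [PySem.Dict.items_insert_of_not_contains _ _ hcont', ih]
        rw [pathsOf_append, if_neg (by simp [hp, hc]), List.map_append]
        congr 1
        · apply List.map_congr_left
          intro q hq
          rw [fcAux_append]
          have : probe q e = none := by
            unfold probe
            rw [if_neg (fun (h : manifestOf e = q) => hc (by rw [h]; exact hq))]
          rw [this, Option.or_none]
        · have hfl : fcAux l (manifestOf e) = none := fcAux_none_of_not_mem l _ hp hc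
          simp only [List.map_cons, List.map_nil]
          rw [fcAux_append, hfl, Option.none_or]
          unfold probe
          rw [if_pos rfl]
          by_cases hcv : coverOf e = ""
          · rw [if_pos hcv, hcv]; rfl
          · rw [if_neg hcv]; rfl

-- ===== VERDICT (by name: the statement is the Claim_ definition above) =====
theorem build_cover_map_spec : Claim_equal_build_cover_map := by
  intro entries _
  unfold Spec_build_cover_map
  rw [buildA_eq, invA]
  show _ = ((pathsOf entries).foldl
      (fun d path => d.insert path (first_cover entries path)) PySem.Dict.empty).items
  rw [PySem.Dict.items_foldl_insert_fresh (pathsOf entries) (fun p => p)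
      (fun p => first_cover entries p) PySem.Dict.empty
      (fun a _ => by simp [PySem.Dict.contains, PySem.Dict.empty])
      (by simpa using (pathsOf_props entries).1)]
  simp [PySem.Dict.empty, fc_eq]
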